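-- pv_equiv track=rewrite | github.com/Iskan9/Game | Game.py | transfer0_down
-- ===== SOURCE A (Python) =====
-- def transfer0_down(mat):  # перенос нулей вверх
--     flag = False
--     new = [[0] * len(mat) for _ in range(len(mat))]
--     for i in range(len(mat)):
--         row_non_zero = [mat[j][i] for j in range(len(mat[i])) if mat[j][i] != 0]
--         count_0 = len(mat[i]) - len(row_non_zero)
--         for k in range(count_0):
--             row_non_zero.append(0)  # вставить в конец  0
--         for r in range(len(new)):
--             new[r][i] = row_non_zero[r]
--     if mat != new:
--         flag = True
--     return (new, flag)
-- ===== SOURCE B (Python) =====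
-- def transfer0_down(mat):
--     # Transpose by indexing, stably sort each column with key "is zero"
--     # (nonzeros keep their order and float to the top, zeros sink), transpose back.
--     n = len(mat)
--     cols = [sorted([row[i] for row in mat], key=lambda v: v == 0) for i in range(n)]
--     new = [[col[r] for col in cols] for r in range(n)]
--     return (new, mat != new)
-- ===== Notes on version B (the rewrite author's own statement) =====
-- stated objective: alternative
-- what changed: Replaces A's per-column extract-nonzeros/pad/copy-back loops with a transpose, a stable sort of each column keyed by 'is zero', and a transpose back.
import Mathlib
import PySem

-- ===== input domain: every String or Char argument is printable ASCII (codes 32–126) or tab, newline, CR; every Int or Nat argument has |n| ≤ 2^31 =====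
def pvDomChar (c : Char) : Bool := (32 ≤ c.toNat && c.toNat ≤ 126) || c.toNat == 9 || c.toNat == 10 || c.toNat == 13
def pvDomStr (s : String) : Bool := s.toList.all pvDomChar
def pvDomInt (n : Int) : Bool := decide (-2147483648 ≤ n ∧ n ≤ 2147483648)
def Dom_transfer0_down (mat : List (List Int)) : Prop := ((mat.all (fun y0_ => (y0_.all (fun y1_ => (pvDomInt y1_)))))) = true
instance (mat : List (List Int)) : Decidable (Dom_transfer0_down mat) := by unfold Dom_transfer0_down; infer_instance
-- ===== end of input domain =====

-- B replaces A's per-column extract-nonzeros/pad-with-zeros/copy-back loops by a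
-- transpose, a stable sort of each column keyed by "is zero", and a transpose back
-- (objective: alternative).

-- ===== PORT A =====
-- new[r][i] = v  (A's write-back assignment; out-of-range is a no-op, unreachable inside Pre_)
def setCell (m : List (List Int)) (r c : Nat) (v : Int) : List (List Int) :=
  m.set r ((m.getD r []).set c v)

-- literal transliteration of A; list indexing uses getD, whose default is only hit on
-- inputs where Python raises IndexError (exactly the non-square inputs Pre_ excludes)
def aStep (mat : List (List Int)) (n : Nat) (nw : List (List Int)) (i : Nat) : List (List Int) :=
  let leni := (mat.getD i []).length
  let rnz := (List.range leni).filterMap (fun j =>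
    let v := (mat.getD j []).getD i 0
    if v ≠ 0 then some v else none)
  let col := rnz ++ List.replicate (leni - rnz.length) 0
  (List.range n).foldl (fun nw2 r => setCell nw2 r i (col.getD r 0)) nw

def transfer0_down (mat : List (List Int)) : List (List Int) × Bool :=
  let n := mat.length
  let new0 := List.replicate n (List.replicate n (0 : Int))
  let new := (List.range n).foldl (aStep mat n) new0
  (new, decide (mat ≠ new))

-- ===== PORT B =====
-- literal transliteration of B: index-based transpose, stable sort each column by
-- key (v == 0), index-based transpose back; list indexing row[i] / col[r] via getD,
-- whose default is only hit where Python raises IndexError (outside Pre_)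
def transfer0_down_alt (mat : List (List Int)) : List (List Int) × Bool :=
  let n := mat.length
  let cols := (List.range n).map (fun i =>
    PySem.List.sorted (mat.map (fun row => row.getD i 0)) (fun v => decide (v = 0)) false)
  let new := (List.range n).map (fun r => cols.map (fun col => col.getD r 0))
  (new, decide (mat ≠ new))

-- ===== PRECONDITION & SPEC =====
-- Pre_ = square matrix: on every non-square mat the Python A raises IndexError
-- (mat[j][i] or row_non_zero[r] out of range), so it is excluded.
def Pre_transfer0_down (mat : List (List Int)) : Prop :=
  ∀ row ∈ mat, row.length = mat.length

instance (mat : List (List Int)) : Decidable (Pre_transfer0_down mat) := by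
  unfold Pre_transfer0_down; infer_instance

def pvWitness_transfer0_down : List (List Int) := [[0, 1], [2, 0]]

def Spec_transfer0_down (mat : List (List Int)) (out : List (List Int) × Bool) : Prop := out = transfer0_down_alt mat
instance (mat : List (List Int)) (out : List (List Int) × Bool) : Decidable (Spec_transfer0_down mat out) := by unfold Spec_transfer0_down; infer_instance

-- ===== CLAIM (what is proved, stated in full; the proofs are below) =====
def Claim_equal_transfer0_down : Prop := ∀ (mat : List (List Int)), Dom_transfer0_down mat → Pre_transfer0_down mat → Spec_transfer0_down mat (transfer0_down mat)

-- ===== LEMMAS AND PROOFS =====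

-- cell view of a matrix (for proofs only)
def cell (m : List (List Int)) (r c : Nat) : Int := (m.getD r []).getD c 0

-- shape: n rows, each of length n
def Shape (n : Nat) (m : List (List Int)) : Prop :=
  m.length = n ∧ ∀ row ∈ m, row.length = n

-- named copy of A's inner-loop body (proof-side only; definitionally the port's lambda)
def astepf (i : Nat) (col : List Int) (nw2 : List (List Int)) (r : Nat) : List (List Int) :=
  setCell nw2 r i (col.getD r 0)

theorem getD_mem_of_lt (m : List (List Int)) {r : Nat} (hr : r < m.length) :
    m.getD r [] ∈ m := by
  rw [List.getD_eq_getElem?_getD, List.getElem?_eq_getElem hr]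
  simp only [Option.getD_some]
  exact List.getElem_mem hr

theorem shape_setCell {n : Nat} {m : List (List Int)} (h : Shape n m) (r c : Nat) (v : Int) :
    Shape n (setCell m r c v) := by
  obtain ⟨h1, h2⟩ := h
  by_cases hr : r < m.length
  · refine ⟨by simp [setCell, h1], ?_⟩
    intro row hrow
    rcases List.mem_or_eq_of_mem_set hrow with hmem | heq
    · exact h2 _ hmem
    · subst heq
      simpa using h2 _ (getD_mem_of_lt m hr)
  · rw [setCell, List.set_eq_of_length_le (by omega)]
    exact ⟨h1, h2⟩

theorem cell_setCell {n : Nat} {m : List (List Int)} (h : Shape n m)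
    (r c : Nat) (hr : r < n) (hc : c < n) (v : Int) (r' c' : Nat) :
    cell (setCell m r c v) r' c' = if r' = r ∧ c' = c then v else cell m r' c' := by
  obtain ⟨h1, h2⟩ := h
  have hrm : r < m.length := by omega
  have hrow : (m[r]?.getD ([] : List Int)).length = n := h2 _ (getD_mem_of_lt m hrm)
  simp only [cell, setCell, List.getD_eq_getElem?_getD]
  by_cases hrr : r' = r
  · subst hrr
    rw [List.getElem?_set_self hrm]
    simp only [Option.getD_some]
    by_cases hcc : c' = c
    · subst hcc
      rw [List.getElem?_set_self (by omega)]
      simp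
    · rw [List.getElem?_set_ne (fun he => hcc he.symm)]
      simp [hcc]
  · rw [List.getElem?_set_ne (fun he => hrr he.symm)]
    simp [hrr]

-- the nonzero entries of column i among rows l
def nzCol (mat : List (List Int)) (i : Nat) (l : List Nat) : List Int :=
  l.filterMap (fun j =>
    let v := (mat.getD j []).getD i 0
    if v ≠ 0 then some v else none)

-- A's column i as written back: nonzeros first, then the zero padding
def colA (mat : List (List Int)) (i : Nat) : List Int :=
  nzCol mat i (List.range mat.length) ++
    List.replicate (mat.length - (nzCol mat i (List.range mat.length)).length) 0

-- ===== characterisation of A's inner write-back loop =====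
theorem aInner_cell {n : Nat} (i : Nat) (hi : i < n) (col : List Int) :
    ∀ (l : List Nat) (nw : List (List Int)), Shape n nw → (∀ r ∈ l, r < n) →
      Shape n (l.foldl (astepf i col) nw) ∧
      ∀ r c, cell (l.foldl (astepf i col) nw) r c =
        if r ∈ l ∧ c = i then col.getD r 0 else cell nw r c := by
  intro l
  induction l with
  | nil =>
    intro nw hs _
    exact ⟨hs, fun r c => by simp⟩
  | cons h t ih =>
    intro nw hs hl
    have hh : h < n := hl h (by simp)
    have hs' : Shape n (astepf i col nw h) := shape_setCell hs h i (col.getD h 0)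
    obtain ⟨ihS, ihC⟩ := ih (astepf i col nw h) hs' (fun r hr => hl r (by simp [hr]))
    simp only [List.foldl_cons]
    refine ⟨ihS, ?_⟩
    intro r c
    rw [ihC r c]
    rw [show astepf i col nw h = setCell nw h i (col.getD h 0) from rfl,
      cell_setCell hs h i hh hi (col.getD h 0) r c]
    by_cases hci : c = i
    · subst hci
      by_cases hrt : r ∈ t
      · simp [hrt]
      · by_cases hrh : r = h <;> simp [hrt, hrh]
    · simp [hci]

-- under Pre_, each row of mat has length mat.length
theorem row_length (mat : List (List Int)) (hp : Pre_transfer0_down mat)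
    {i : Nat} (hi : i < mat.length) : (mat.getD i []).length = mat.length :=
  hp _ (getD_mem_of_lt mat hi)

-- A's column step, rewritten through colA (uses Pre_)
theorem aStep_eq (mat : List (List Int)) (hp : Pre_transfer0_down mat)
    (nw : List (List Int)) (i : Nat) (hi : i < mat.length) :
    aStep mat mat.length nw i =
      (List.range mat.length).foldl (astepf i (colA mat i)) nw := by
  simp only [aStep, row_length mat hp hi]
  rfl

-- ===== characterisation of A's outer loop =====
theorem aOuter_cell (mat : List (List Int)) (hp : Pre_transfer0_down mat) :
    ∀ (l : List Nat) (nw : List (List Int)), Shape mat.length nw → (∀ c ∈ l, c < mat.length) →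
      Shape mat.length (l.foldl (aStep mat mat.length) nw) ∧
      ∀ r c, r < mat.length →
        cell (l.foldl (aStep mat mat.length) nw) r c =
          if c ∈ l then (colA mat c).getD r 0 else cell nw r c := by
  intro l
  induction l with
  | nil =>
    intro nw hs _
    exact ⟨hs, fun r c _ => by simp⟩
  | cons h t ih =>
    intro nw hs hl
    have hh : h < mat.length := hl h (by simp)
    obtain ⟨hIS, hIC⟩ := aInner_cell (n := mat.length) h hh (colA mat h)
      (List.range mat.length) nw hs (fun r hr => List.mem_range.mp hr)
    have hstep : aStep mat mat.length nw h =
        (List.range mat.length).foldl (astepf h (colA mat h)) nw := aStep_eq mat hp nw h hh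
    simp only [List.foldl_cons, hstep]
    obtain ⟨ihS, ihC⟩ := ih _ hIS (fun c hc => hl c (by simp [hc]))
    refine ⟨ihS, ?_⟩
    intro r c hr
    rw [ihC r c hr, hIC r c]
    by_cases hct : c ∈ t
    · simp [hct]
    · by_cases hch : c = h
      · subst hch
        simp [hct, List.mem_range.mpr hr]
      · simp [hct, hch]

-- ===== the stable sort with key "is zero" = nonzeros then zeros =====
theorem insertBy_zero (a : List Int) (k : Nat) :
    PySem.List.insertBy
      (fun x y => decide ((decide (x = 0) : Bool) < (decide (y = 0) : Bool))) 0
      (a ++ List.replicate k 0) = a ++ List.replicate k 0 ++ [0] := by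
  apply PySem.List.insertBy_of_forall_not_before
  intro y _
  simp

theorem insertBy_nonzero (x : Int) (hx : x ≠ 0) (k : Nat) :
    ∀ (a : List Int), (∀ v ∈ a, v ≠ 0) →
      PySem.List.insertBy
        (fun u y => decide ((decide (u = 0) : Bool) < (decide (y = 0) : Bool))) x
        (a ++ List.replicate k 0) = a ++ x :: List.replicate k 0 := by
  intro a
  induction a with
  | nil =>
    intro _
    cases k with
    | zero => simp [PySem.List.insertBy]
    | succ m =>
      simp only [List.nil_append, List.replicate_succ]
      rw [show PySem.List.insertBy
          (fun u y => decide ((decide (u = 0) : Bool) < (decide (y = 0) : Bool))) x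
          (0 :: List.replicate m 0) =
          if decide ((decide (x = 0) : Bool) < (decide ((0:Int) = 0) : Bool)) = true
          then x :: 0 :: List.replicate m 0
          else 0 :: PySem.List.insertBy _ x (List.replicate m 0) from rfl]
      simp [hx]
  | cons y t ih =>
    intro ha
    have hy : y ≠ 0 := ha y (by simp)
    simp only [List.cons_append]
    rw [show PySem.List.insertBy
        (fun u z => decide ((decide (u = 0) : Bool) < (decide (z = 0) : Bool))) x
        (y :: (t ++ List.replicate k 0)) =
        if decide ((decide (x = 0) : Bool) < (decide (y = 0) : Bool)) = true
        then x :: y :: (t ++ List.replicate k 0)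
        else y :: PySem.List.insertBy _ x (t ++ List.replicate k 0) from rfl]
    simp only [hy, hx, decide_eq_true_eq]
    rw [if_neg (by simp [hx, hy])]
    rw [ih (fun v hv => ha v (by simp [hv]))]

theorem sorted_zero_key (col : List Int) :
    PySem.List.sorted col (fun v => decide (v = 0)) false =
      col.filter (fun v => decide (v ≠ 0)) ++ List.replicate (col.count 0) 0 := by
  rw [PySem.List.sorted_eq_foldl_insertBy]
  suffices h : ∀ (l a : List Int) (k : Nat), (∀ v ∈ a, v ≠ 0) →
      l.foldl (fun acc x => PySem.List.insertBy
        (fun u y => decide ((decide (u = 0) : Bool) < (decide (y = 0) : Bool))) x acc)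
        (a ++ List.replicate k 0) =
      (a ++ l.filter (fun v => decide (v ≠ 0))) ++ List.replicate (k + l.count 0) 0 by
    simpa using h col [] 0 (by simp)
  intro l
  induction l with
  | nil => intro a k _; simp
  | cons x t ih =>
    intro a k ha
    simp only [List.foldl_cons]
    by_cases hx : x = 0
    · subst hx
      rw [insertBy_zero a k, List.append_assoc, ← List.replicate_succ']
      rw [ih a (k + 1) ha]
      have hc : (0 :: t).count (0 : Int) = t.count 0 + 1 := by simp [List.count_cons]
      have hf : (0 :: t).filter (fun v => decide (v ≠ 0)) = t.filter (fun v => decide (v ≠ 0)) := by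
        simp [List.filter_cons]
      rw [hc, hf, show k + 1 + t.count 0 = k + (t.count 0 + 1) by omega]
    · rw [insertBy_nonzero x hx k a ha,
        show a ++ x :: List.replicate k 0 = (a ++ [x]) ++ List.replicate k 0 by simp]
      have ha' : ∀ v ∈ a ++ [x], v ≠ 0 := by
        intro v hv
        rcases List.mem_append.mp hv with h | h
        · exact ha v h
        · simp at h; subst h; exact hx
      rw [ih (a ++ [x]) k ha']
      have hc : (x :: t).count (0 : Int) = t.count 0 := by simp [List.count_cons, hx]
      have hf : (x :: t).filter (fun v => decide (v ≠ 0)) = x :: t.filter (fun v => decide (v ≠ 0)) := by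
        simp [List.filter_cons, hx]
      rw [hc, hf]
      simp

-- ===== pyZipStar on an equal-row-length matrix is the index transpose =====
-- map over indices = map over the list
theorem map_getD_range (m : List (List Int)) (f : List Int → Int) :
    (List.range m.length).map (fun j => f (m.getD j [])) = m.map f := by
  apply List.ext_getElem
  · simp
  · intro j h1 h2
    simp [List.getD_eq_getElem?_getD, List.getElem?_eq_getElem (by simpa using h2)]

theorem filterMap_if_ne (l : List Int) :
    l.filterMap (fun v => if v ≠ 0 then some v else none) =
      l.filter (fun v => decide (v ≠ 0)) := by
  induction l with
  | nil => rfl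
  | cons x t ih =>
    by_cases hx : x = 0
    · simpa [List.filterMap_cons, List.filter_cons, hx] using ih
    · simpa [List.filterMap_cons, List.filter_cons, hx] using ih

theorem nzCol_eq_filter (mat : List (List Int)) (c : Nat) :
    nzCol mat c (List.range mat.length) =
      (mat.map (fun r => r.getD c 0)).filter (fun v => decide (v ≠ 0)) := by
  have h1 : nzCol mat c (List.range mat.length) =
      ((List.range mat.length).map (fun j => (mat.getD j []).getD c 0)).filterMap
        (fun v => if v ≠ 0 then some v else none) := by
    rw [List.filterMap_map]
    rfl
  rw [h1, map_getD_range mat (fun r => r.getD c 0), filterMap_if_ne]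

theorem filter_length_add_count (col : List Int) :
    (col.filter (fun v => decide (v ≠ 0))).length + col.count 0 = col.length := by
  induction col with
  | nil => rfl
  | cons x t ih =>
    by_cases hx : x = 0 <;>
      simp [List.filter_cons, List.count_cons, hx] at ih ⊢ <;> omega

theorem colA_eq_sorted (mat : List (List Int)) (c : Nat) :
    colA mat c =
      PySem.List.sorted (mat.map (fun r => r.getD c 0)) (fun v => decide (v = 0)) false := by
  set col := mat.map (fun r => r.getD c 0) with hcol
  have hlen : col.length = mat.length := by simp [hcol]
  have hsplit := filter_length_add_count col
  rw [sorted_zero_key col, colA, nzCol_eq_filter mat c, ← hcol]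
  congr 2
  omega

-- ===== VERDICT (by name: the statement is the Claim_ definition above) =====
theorem transfer0_down_spec : Claim_equal_transfer0_down := by
  intro mat _ hp
  unfold Spec_transfer0_down transfer0_down transfer0_down_alt
  set n := mat.length with hndef
  set new0 := List.replicate n (List.replicate n (0 : Int)) with hnew0
  have hs0 : Shape n new0 := ⟨by simp [hnew0], fun row hrow => by
    rw [List.eq_of_mem_replicate hrow]; simp⟩
  obtain ⟨hSA, hCA⟩ := aOuter_cell mat hp (List.range n) new0 hs0
    (fun c hc => List.mem_range.mp hc)
  set newA := (List.range n).foldl (aStep mat n) new0 with hnewA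
  set cols := (List.range n).map (fun i =>
    PySem.List.sorted (mat.map (fun row => row.getD i 0)) (fun v => decide (v = 0)) false)
    with hcols
  have hcols2 : cols = (List.range n).map (fun i => colA mat i) := by
    rw [hcols]
    apply List.map_congr_left
    intro i _
    exact (colA_eq_sorted mat i).symm
  have hcolslen : cols.length = n := by rw [hcols2]; simp
  have hmain : newA = (List.range n).map (fun r => cols.map (fun col => col.getD r 0)) := by
    apply List.ext_getElem
    · simp [hSA.1, ← hndef]
    · intro r h1 h2
      have hr : r < n := by rw [hSA.1] at h1; exact h1
      apply List.ext_getElem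
      · rw [hSA.2 _ (List.getElem_mem h1)]
        simp [hcolslen]
        omega
      · intro c hc1 hc2
        have hcn : c < n := by
          have := hSA.2 _ (List.getElem_mem h1)
          omega
        have e1 : (newA[r]'h1)[c]'hc1 = cell newA r c := by
          simp [cell, List.getD_eq_getElem?_getD, List.getElem?_eq_getElem h1,
            List.getElem?_eq_getElem hc1]
        rw [e1, hCA r c hr, if_pos (List.mem_range.mpr hcn)]
        have hcc : c < cols.length := by omega
        simp only [List.getElem_map, List.getElem_range]
        rw [List.getElem_of_eq hcols2 hcc]
        simp only [List.getElem_map, List.getElem_range]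
  show (newA, decide (mat ≠ newA)) =
    ((List.range n).map (fun r => cols.map (fun col => col.getD r 0)),
      decide (mat ≠ (List.range n).map (fun r => cols.map (fun col => col.getD r 0))))
  rw [hmain]
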